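-- pv_equiv track=rewrite | github.com/avishagmoshe/miniProjectBioinformatics | init.py | findCog
-- ===== SOURCE A (Python) =====
-- def findCog(currLine, cogList):
--     check_cog_list = cogList.copy()
--     for i in range(len(currLine)):
--         for cog in cogList:
--             if cog in currLine[i] and cog != 'X':
--                 if cog in check_cog_list:
--                     check_cog_list.remove(cog)
--     if len(check_cog_list) == 0:
--         return 1
--     return 0
-- ===== SOURCE B (Python) =====
-- def findCog(currLine, cogList):
--     for cog in cogList:
--         if cog == 'X' or not any(cog in line for line in currLine):
--             return 0
--     return 1
-- ===== Notes on version B (the rewrite author's own statement) =====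
-- stated objective: simpler
-- what changed: Replaces the line-outer/cog-inner scan with a mutable check_cog_list and guarded remove() bookkeeping by a single cog-outer existence test (any(cog in line ...)) with early return, keeping the 'X'-forces-0 behaviour.
import Mathlib
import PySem

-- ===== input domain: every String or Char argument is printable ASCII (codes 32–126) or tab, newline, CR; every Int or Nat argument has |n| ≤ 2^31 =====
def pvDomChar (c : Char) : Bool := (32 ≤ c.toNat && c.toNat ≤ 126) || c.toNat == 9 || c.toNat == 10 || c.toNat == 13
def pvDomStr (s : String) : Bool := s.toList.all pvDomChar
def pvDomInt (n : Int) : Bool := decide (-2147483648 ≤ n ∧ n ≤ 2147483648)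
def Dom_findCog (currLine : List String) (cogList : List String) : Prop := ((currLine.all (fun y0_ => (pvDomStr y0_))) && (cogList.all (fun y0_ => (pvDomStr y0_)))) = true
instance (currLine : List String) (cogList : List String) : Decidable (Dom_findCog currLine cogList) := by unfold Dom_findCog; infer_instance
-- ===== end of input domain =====

-- B replaces A's line-outer/cog-inner scan with a mutable removal list by a single
-- cog-outer existence test with early return (objective: simpler).

-- ===== PORT A =====
-- for i in range(len(currLine)): ... currLine[i] — every index is in range, so this is
-- exactly a left-to-right fold over the elements of currLine.
def findCog (currLine : List String) (cogList : List String) : Int :=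
  let check :=
    currLine.foldl (fun check line =>
      cogList.foldl (fun check cog =>
        if PySem.Str.isIn cog line && cog != "X" then
          -- 'if cog in check_cog_list: check_cog_list.remove(cog)'
          if check.contains cog then (PySem.List.remove? check cog).getD check else check
        else check) check) cogList
  if check.length = 0 then 1 else 0

-- ===== PORT B =====
-- early-return loop over cogList
def findCogAltGo (currLine : List String) : List String → Int
  | [] => 1
  | cog :: rest =>
    if cog == "X" || !(currLine.any (fun line => PySem.Str.isIn cog line)) then 0
    else findCogAltGo currLine rest

def findCog_alt (currLine : List String) (cogList : List String) : Int :=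
  findCogAltGo currLine cogList

-- ===== PRECONDITION & SPEC =====
def Spec_findCog (currLine : List String) (cogList : List String) (out : Int) : Prop := out = findCog_alt currLine cogList
instance (currLine : List String) (cogList : List String) (out : Int) : Decidable (Spec_findCog currLine cogList out) := by unfold Spec_findCog; infer_instance

-- ===== CLAIM (what is proved, stated in full; the proofs are below) =====
def Claim_equal_findCog : Prop := ∀ (currLine : List String) (cogList : List String), Dom_findCog currLine cogList → Spec_findCog currLine cogList (findCog currLine cogList)

-- ===== LEMMAS AND PROOFS =====

-- condition under which A's inner loop removes cog at a given line
def pvCond (line c : String) : Bool := PySem.Str.isIn c line && c != "X"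

-- a cog is "good" w.r.t. currLine: not 'X' and a substring of some line
def pvGood (currLine : List String) (c : String) : Bool :=
  c != "X" && currLine.any (fun line => PySem.Str.isIn c line)

-- B computes 'if all cogs good then 1 else 0'
theorem findCogAltGo_eq (currLine : List String) (L : List String) :
    findCogAltGo currLine L = if L.all (pvGood currLine) then 1 else 0 := by
  induction L with
  | nil => simp [findCogAltGo]
  | cons cog rest ih =>
    have hb : (cog == "X" || !currLine.any (fun line => PySem.Str.isIn cog line))
        = !(pvGood currLine cog) := by
      simp [pvGood, Bool.not_and, bne, Bool.not_not]
    rw [findCogAltGo, hb, ih, List.all_cons]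
    cases g : pvGood currLine cog <;> simp only [g, Bool.not_true, Bool.not_false,
      Bool.true_and, Bool.false_and, if_true, if_false] <;> simp

-- the guarded remove decreases the count of c by one exactly when cog = c (truncated at 0)
theorem count_guardedRemove (s : List String) (cog c : String) :
    (if s.contains cog then (PySem.List.remove? s cog).getD s else s).count c
      = s.count c - (if cog = c then 1 else 0) := by
  by_cases hm : cog ∈ s
  · rw [if_pos (by simpa using hm), PySem.List.remove?_eq_some_erase s cog hm]
    simp [List.count_erase]
  · rw [if_neg (by simpa using hm)]
    by_cases h : cog = c
    · subst h; simp [List.count_eq_zero.mpr hm]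
    · simp [h]

-- A's inner loop over cogList at one line: counts drop by (count in cogList) when the condition holds
theorem count_inner (line : String) :
    ∀ (t s : List String) (c : String),
    (t.foldl (fun check cog =>
        if PySem.Str.isIn cog line && cog != "X" then
          if check.contains cog then (PySem.List.remove? check cog).getD check else check
        else check) s).count c
      = s.count c - (if pvCond line c then t.count c else 0) := by
  intro t
  induction t with
  | nil => intro s c; simp
  | cons cog rest ih =>
    intro s c
    simp only [List.foldl_cons]
    by_cases hcc : cog = c
    · subst hcc
      by_cases hc : (PySem.Str.isIn cog line && cog != "X") = true
      · rw [if_pos hc, ih, count_guardedRemove, if_pos rfl,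
          if_pos (show pvCond line cog = true from hc),
          if_pos (show pvCond line cog = true from hc), List.count_cons_self]
        omega
      · rw [if_neg hc, ih,
          if_neg (show ¬ pvCond line cog = true from hc),
          if_neg (show ¬ pvCond line cog = true from hc)]
    · have hcnt : (cog :: rest).count c = rest.count c := by
        simp [hcc]
      by_cases hc : (PySem.Str.isIn cog line && cog != "X") = true
      · rw [if_pos hc, ih, count_guardedRemove, if_neg hcc, hcnt]; omega
      · rw [if_neg hc, ih, hcnt]

-- A's outer loop: invariant on counts parametrised by the "already satisfied" predicate p
theorem count_outer (cogList : List String) :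
    ∀ (lines : List String) (s : List String) (p : String → Bool),
    (∀ c, s.count c = if p c then 0 else cogList.count c) →
    ∀ c, (lines.foldl (fun check line =>
        cogList.foldl (fun check cog =>
          if PySem.Str.isIn cog line && cog != "X" then
            if check.contains cog then (PySem.List.remove? check cog).getD check else check
          else check) check) s).count c
      = if p c || lines.any (fun line => pvCond line c) then 0
        else cogList.count c := by
  intro lines
  induction lines with
  | nil => intro s p hs c; simpa using hs c
  | cons line rest ih =>
    intro s p hs c
    simp only [List.foldl_cons]
    rw [ih _ (fun c => p c || pvCond line c)
        (fun c => by
          rw [count_inner line cogList s c, hs c]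
          cases hp : p c <;> cases hc : pvCond line c <;> simp [hp, hc])]
    rw [List.any_cons, Bool.or_assoc]

-- final check list is empty iff every cog of cogList is good
theorem check_empty_iff (currLine cogList : List String) :
    ((currLine.foldl (fun check line =>
        cogList.foldl (fun check cog =>
          if PySem.Str.isIn cog line && cog != "X" then
            if check.contains cog then (PySem.List.remove? check cog).getD check else check
          else check) check) cogList).length = 0)
      ↔ cogList.all (pvGood currLine) = true := by
  have hcount := count_outer cogList currLine cogList (fun _ => false) (fun c => by simp)
  have hgood : ∀ c, (currLine.any (fun line => pvCond line c)) = pvGood currLine c := by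
    intro c
    simp only [pvCond, pvGood]
    cases hx : (c != "X") <;> simp [hx]
  simp only [Bool.false_or, hgood] at hcount
  constructor
  · intro h
    rw [List.all_eq_true]
    intro c hc
    have hnil := List.length_eq_zero_iff.mp h
    simp only [hnil, List.count_nil] at hcount
    have h0 := (hcount c).symm
    have hmem : 0 < cogList.count c := List.count_pos_iff.mpr hc
    by_cases hg : pvGood currLine c = true
    · exact hg
    · rw [if_neg hg] at h0; omega
  · intro h
    rw [List.length_eq_zero_iff, List.eq_nil_iff_forall_not_mem]
    intro c hmem
    have hcpos := List.count_pos_iff.mpr hmem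
    rw [hcount c] at hcpos
    by_cases hg : pvGood currLine c = true
    · rw [if_pos hg] at hcpos; omega
    · rw [if_neg hg] at hcpos
      exact hg (List.all_eq_true.mp h c (List.count_pos_iff.mp hcpos))

-- ===== VERDICT (by name: the statement is the Claim_ definition above) =====
theorem findCog_spec : Claim_equal_findCog := by
  intro currLine cogList _
  unfold Spec_findCog findCog findCog_alt
  rw [findCogAltGo_eq]
  by_cases h : cogList.all (pvGood currLine) = true
  · rw [if_pos ((check_empty_iff currLine cogList).mpr h), if_pos h]
  · rw [if_neg (fun hl => h ((check_empty_iff currLine cogList).mp hl)), if_neg h]
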